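-- pv_equiv track=rewrite | github.com/jaySHKorea/Coding-Test | 2103-week5/모험가길드.py | solution
-- ===== SOURCE A (Python) =====
-- def solution(N, members):
--     answer = 0
--     group = 0
--
--     members.sort()
--
--     for mem in members:
--         group += 1
--         if group >= mem:
--             answer += 1
--             group = 0
--
--     return answer
-- ===== SOURCE B (Python) =====
-- def solution(N, members):
--     # Batch processing over runs of equal fear values (sorts members in place, like A).
--     members.sort()
--     answer = 0
--     pending = 0
--     i = 0
--     n = len(members)
--     while i < n:
--         v = members[i]
--         j = i
--         while j < n and members[j] == v:
--             j += 1
--         c = j - i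
--         if v <= 0:
--             # any non-empty group satisfies a non-positive fear level
--             answer += c
--             pending = 0
--         else:
--             answer += (pending + c) // v
--             pending = (pending + c) % v
--         i = j
--     return answer
-- ===== Notes on version B (the rewrite author's own statement) =====
-- stated objective: alternative
-- what changed: Instead of incrementing a group counter one member at a time, B scans runs of equal fear values in the sorted list and computes each run's completed groups in one division: answer += (pending+c)//v, pending = (pending+c)%v.
import Mathlib
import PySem

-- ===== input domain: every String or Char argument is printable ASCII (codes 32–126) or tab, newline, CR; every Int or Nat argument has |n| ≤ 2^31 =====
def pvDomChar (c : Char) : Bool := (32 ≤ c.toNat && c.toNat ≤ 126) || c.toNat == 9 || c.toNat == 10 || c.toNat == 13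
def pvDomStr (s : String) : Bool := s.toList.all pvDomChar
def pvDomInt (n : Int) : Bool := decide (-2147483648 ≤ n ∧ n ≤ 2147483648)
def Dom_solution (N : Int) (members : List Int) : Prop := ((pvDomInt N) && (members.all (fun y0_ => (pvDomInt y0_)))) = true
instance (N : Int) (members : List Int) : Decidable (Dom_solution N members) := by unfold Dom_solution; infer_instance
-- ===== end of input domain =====

-- B replaces A's one-member-at-a-time greedy scan with per-run batched division; both sort members
-- in place in Python (the in-place mutation is identical), the equivalence proved here is about the
-- return value.

-- ===== PORT A =====
-- the body of A's for-loop, acting on the state (answer, group)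
def solStep (st : Int × Int) (mem : Int) : Int × Int :=
  let group := st.2 + 1
  if group ≥ mem then (st.1 + 1, 0) else (st.1, group)

def solution (N : Int) (members : List Int) : Int :=
  ((PySem.List.sorted members (fun x => x) false).foldl solStep ((0 : Int), (0 : Int))).1

-- ===== PORT B =====
-- B's outer while-loop: consume one run of equal values per step, carrying (answer, pending)
def solRuns (answer pending : Int) : List Int → Int
  | [] => answer
  | v :: rest =>
      let c : Int := (rest.takeWhile (fun x => x = v)).length + 1
      let rest' := rest.dropWhile (fun x => x = v)
      if v ≤ 0 then
        solRuns (answer + c) 0 rest'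
      else
        solRuns (answer + PySem.Int.floordiv (pending + c) v)
                (PySem.Int.mod (pending + c) v) rest'
  termination_by l => l.length
  decreasing_by
    all_goals
      have h := List.length_dropWhile_le (fun x => decide (x = v)) rest
      simp only [List.length_cons]
      omega

def solution_alt (N : Int) (members : List Int) : Int :=
  solRuns 0 0 (PySem.List.sorted members (fun x => x) false)

-- ===== PRECONDITION & SPEC =====
def Spec_solution (N : Int) (members : List Int) (out : Int) : Prop := out = solution_alt N members
instance (N : Int) (members : List Int) (out : Int) : Decidable (Spec_solution N members out) := by unfold Spec_solution; infer_instance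

-- ===== CLAIM (what is proved, stated in full; the proofs are below) =====
def Claim_equal_solution : Prop := ∀ (N : Int) (members : List Int), Dom_solution N members → Spec_solution N members (solution N members)

-- ===== LEMMAS AND PROOFS =====

-- A's loop over a run of c+1 copies of a non-positive value: every member closes a group.
lemma foldA_replicate_nonpos (v : Int) (c : Nat) (a p : Int) (hp : 0 ≤ p) (hv : v ≤ 0) :
    (List.replicate (c + 1) v).foldl solStep (a, p) = (a + (c + 1 : Nat), 0) := by
  induction c generalizing a p with
  | zero =>
      simp only [List.replicate, List.foldl, solStep]
      rw [if_pos (by omega)]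
      norm_num
  | succ c ih =>
      rw [List.replicate_succ, List.foldl_cons]
      have h1 : solStep (a, p) v = (a + 1, 0) := by
        simp only [solStep]; rw [if_pos (by omega)]
      rw [h1, ih (a + 1) 0 le_rfl]
      simp only [Prod.mk.injEq, and_true]
      push_cast; ring

-- A's loop over c copies of a positive value v starting with 0 ≤ p < v:
-- ⌊(p+c)/v⌋ groups close, pending becomes (p+c) mod v.
lemma foldA_replicate_pos (v : Int) (c : Nat) (a p : Int) (hp : 0 ≤ p) (hpv : p < v) :
    (List.replicate c v).foldl solStep (a, p) = (a + (p + c) / v, (p + c) % v) := by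
  have hv : 0 < v := lt_of_le_of_lt hp hpv
  induction c generalizing a p with
  | zero =>
      simp only [List.replicate, List.foldl, Nat.cast_zero, add_zero]
      rw [Int.ediv_eq_zero_of_lt hp hpv, Int.emod_eq_of_lt hp hpv, add_zero]
  | succ c ih =>
      rw [List.replicate_succ, List.foldl_cons]
      by_cases h : p + 1 ≥ v
      · have h1 : solStep (a, p) v = (a + 1, 0) := by
          simp only [solStep]; rw [if_pos h]
        rw [h1, ih (a + 1) 0 le_rfl hv]
        simp only [zero_add]
        have hrw : p + ((c + 1 : Nat) : Int) = (c : Int) + 1 * v := by push_cast; omega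
        rw [hrw, Int.add_mul_ediv_right _ _ (by omega : v ≠ 0),
          Int.add_mul_emod_self_right]
        simp only [Prod.mk.injEq, and_true]
        ring
      -- p + 1 < v: no group closes on this member
      · have h1 : solStep (a, p) v = (a, p + 1) := by
          simp only [solStep]; rw [if_neg h]
        rw [h1, ih a (p + 1) (by omega) (by omega)]
        have he : p + ((c + 1 : Nat) : Int) = p + 1 + (c : Int) := by push_cast; ring
        rw [he]

-- a cons list whose head-run has been identified is a replicate block followed by the tail
lemma cons_eq_replicate_append (v : Int) (rest : List Int) :
    v :: rest = List.replicate ((rest.takeWhile (fun x => x = v)).length + 1) v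
      ++ rest.dropWhile (fun x => x = v) := by
  have htw : rest.takeWhile (fun x => x = v)
      = List.replicate (rest.takeWhile (fun x => x = v)).length v := by
    apply List.eq_replicate_of_mem
    intro x hx
    have := List.mem_takeWhile_imp hx
    simpa using this
  calc v :: rest = v :: (rest.takeWhile (fun x => x = v) ++ rest.dropWhile (fun x => x = v)) := by
        rw [List.takeWhile_append_dropWhile]
    _ = _ := by
        rw [htw]
        simp [List.replicate_succ]

-- main loop invariant: on a nondecreasing list with 0 ≤ pending and pending below every
-- positive element still to come, B's run-batched loop equals A's member-by-member fold.
lemma solRuns_eq_foldA (n : Nat) : ∀ (l : List Int), l.length ≤ n → ∀ (a p : Int),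
    l.Pairwise (· ≤ ·) → 0 ≤ p → (∀ x ∈ l, 0 < x → p < x) →
    solRuns a p l = (l.foldl solStep (a, p)).1 := by
  induction n with
  | zero =>
      intro l hl a p _ _ _
      have : l = [] := List.length_eq_zero_iff.mp (Nat.le_zero.mp hl)
      subst this
      simp [solRuns]
  | succ n ih =>
      intro l hl a p hpair hp hinv
      match l with
      | [] => simp [solRuns]
      | v :: rest =>
        have hdec := cons_eq_replicate_append v rest
        set run := rest.takeWhile (fun x => x = v) with hrun
        set rest' := rest.dropWhile (fun x => x = v) with hrest'
        have hlen : rest'.length ≤ n := by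
          have h := List.length_dropWhile_le (fun x => decide (x = v)) rest
          rw [hrest'] at *
          simp only [List.length_cons] at hl
          omega
        have hpair' : rest'.Pairwise (· ≤ ·) :=
          List.Pairwise.sublist (List.dropWhile_sublist _) (List.Pairwise.of_cons hpair)
        have hvle : ∀ x ∈ rest, v ≤ x := (List.pairwise_cons.mp hpair).1
        have hmem' : ∀ x ∈ rest', x ∈ rest := fun x hx => (List.dropWhile_sublist _).mem hx
        rw [solRuns]
        by_cases hv : v ≤ 0
        · rw [if_pos hv]
          rw [ih rest' hlen _ 0 hpair' le_rfl (fun x _ hx0 => hx0)]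
          conv_rhs => rw [hdec]
          rw [List.foldl_append, foldA_replicate_nonpos v run.length a p hp hv]
          have : a + ((run.length : Int) + 1) = a + ((run.length + 1 : Nat) : Int) := by
            push_cast; ring
          rw [this]
        · rw [if_neg hv]
          have hv0 : 0 < v := by omega
          have hpv : p < v := hinv v (List.mem_cons_self) hv0
          have hfd : PySem.Int.floordiv (p + ((run.length : Int) + 1)) v
              = (p + ((run.length : Int) + 1)) / v := by
            simp [PySem.Int.floordiv, Int.fdiv_eq_ediv_of_nonneg _ (by omega : (0:Int) ≤ v)]
          have hfm : PySem.Int.mod (p + ((run.length : Int) + 1)) v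
              = (p + ((run.length : Int) + 1)) % v := by
            simp [PySem.Int.mod, Int.fmod_eq_emod_of_nonneg _ (by omega : (0:Int) ≤ v)]
          have hp' : 0 ≤ (p + ((run.length : Int) + 1)) % v :=
            Int.emod_nonneg _ (by omega)
          have hp'v : (p + ((run.length : Int) + 1)) % v < v :=
            Int.emod_lt_of_pos _ hv0
          rw [hfd, hfm,
            ih rest' hlen _ _ hpair' hp'
              (fun x hx _ => lt_of_lt_of_le hp'v (hvle x (hmem' x hx)))]
          conv_rhs => rw [hdec]
          rw [List.foldl_append,
            foldA_replicate_pos v (run.length + 1) a p hp hpv]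
          have : p + ((run.length : Int) + 1) = p + ((run.length + 1 : Nat) : Int) := by
            push_cast; ring
          rw [this]

-- ===== VERDICT (by name: the statement is the Claim_ definition above) =====
theorem solution_spec : Claim_equal_solution := by
  intro N members _
  unfold Spec_solution solution solution_alt
  set S := PySem.List.sorted members (fun x => x) false with hS
  have hpair : S.Pairwise (· ≤ ·) := PySem.List.sorted_pairwise members (fun x => x)
  exact (solRuns_eq_foldA S.length S le_rfl 0 0 hpair le_rfl (fun _ _ h => h)).symm
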